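-- pv_equiv track=rewrite | github.com/Federico-Taborda/Programacion-2 | Python - Modulo 3/Ejercicio-12.py | contar_palabras_for
-- ===== SOURCE A (Python) =====
-- def contar_palabras_for(cadena):
--     palabra = ""
--     contador = 0
--
--     for x in range(0, len(cadena)):
--         if cadena[x] != " ":
--             palabra += cadena[x]
--
--         else:
--             if len(palabra) > 5:
--                 contador += 1
--             palabra = ""
--
--     return contador
-- ===== SOURCE B (Python) =====
-- def contar_palabras_for(cadena):
--     # idiomatic: tokenize on single spaces; the original never counts the trailing
--     # segment after the last space, which is exactly the last element of the split
--     words = cadena.split(' ')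
--     return sum(1 for w in words[:-1] if len(w) > 5)
-- ===== Notes on version B (the rewrite author's own statement) =====
-- stated objective: idiomatic
-- what changed: Replaces the character-by-character accumulator loop by a single-space str.split tokenization followed by a count of the long tokens among all but the last (the original counts only space-terminated segments).
import Mathlib
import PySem

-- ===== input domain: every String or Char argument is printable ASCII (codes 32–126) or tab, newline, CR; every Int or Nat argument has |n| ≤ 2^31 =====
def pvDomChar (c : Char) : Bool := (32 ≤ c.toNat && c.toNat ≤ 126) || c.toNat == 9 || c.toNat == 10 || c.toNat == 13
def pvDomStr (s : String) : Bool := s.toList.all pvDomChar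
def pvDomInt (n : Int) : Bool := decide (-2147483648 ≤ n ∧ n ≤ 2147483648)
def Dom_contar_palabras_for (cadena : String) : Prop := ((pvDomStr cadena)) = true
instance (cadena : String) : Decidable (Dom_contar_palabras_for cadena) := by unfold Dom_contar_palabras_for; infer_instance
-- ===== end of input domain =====

-- B replaces A's character-by-character accumulator loop by split(' ') tokenization plus a
-- count of the long tokens among all but the last (A only counts space-terminated segments);
-- objective: idiomatic; same O(n), measurably faster by a constant factor (C-level split).

-- ===== PORT A =====
-- one loop step of A: palabra += c on a non-space, else count-and-reset
def stepAc (st : List Char × Int) (c : Char) : List Char × Int :=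
  if c ≠ ' ' then (st.1 ++ [c], st.2)
  else ([], if 5 < st.1.length then st.2 + 1 else st.2)

def contar_palabras_for (cadena : String) : Int :=
  ((PySem.List.pyRange 0 (PySem.Str.len cadena)).foldl
    (fun st x => stepAc st (PySem.List.pyGetD cadena.toList x ' '))
    (([], 0) : List Char × Int)).2

-- ===== PORT B =====
def contar_palabras_for_alt (cadena : String) : Int :=
  ((PySem.List.slice (PySem.Chars.splitOn cadena.toList [' ']) none (some (-1))).filter
    (fun w => 5 < w.length)).length

-- ===== PRECONDITION & SPEC =====
def Spec_contar_palabras_for (cadena : String) (out : Int) : Prop := out = contar_palabras_for_alt cadena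
instance (cadena : String) (out : Int) : Decidable (Spec_contar_palabras_for cadena out) := by unfold Spec_contar_palabras_for; infer_instance

-- ===== CLAIM (what is proved, stated in full; the proofs are below) =====
def Claim_equal_contar_palabras_for : Prop := ∀ (cadena : String), Dom_contar_palabras_for cadena → Spec_contar_palabras_for cadena (contar_palabras_for cadena)

-- ===== LEMMAS AND PROOFS =====

-- Python's split(' ') as a structural recursion on the character list
def splitSp : List Char → List (List Char)
  | [] => [[]]
  | c :: t => if c = ' ' then [] :: splitSp t else
      match splitSp t with
      | [] => [[c]]
      | h :: r => (c :: h) :: r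

theorem splitSp_ne_nil (l : List Char) : splitSp l ≠ [] := by
  cases l with
  | nil => simp [splitSp]
  | cons c t =>
    simp only [splitSp]
    split
    · simp
    · split <;> simp

def mapHead (f : List Char → List Char) : List (List Char) → List (List Char)
  | [] => [] | h :: t => f h :: t

theorem mapHead_nil_append (ll : List (List Char)) :
    mapHead (fun h => [] ++ h) ll = ll := by
  cases ll <;> simp [mapHead]

theorem mapHead_id (ll : List (List Char)) : mapHead (fun h => h) ll = ll := by
  cases ll <;> simp [mapHead]

theorem go_eq (fuel : Nat) : ∀ (l cur acc : _), l.length ≤ fuel →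
    PySem.Chars.splitOn.go [' '] fuel l cur acc
      = acc.reverse ++ mapHead (cur.reverse ++ ·) (splitSp l) := by
  induction fuel with
  | zero =>
    intro l cur acc h
    have : l = [] := by cases l <;> simp_all
    subst this
    simp [PySem.Chars.splitOn.go, splitSp, mapHead]
  | succ fuel ih =>
    intro l cur acc h
    cases l with
    | nil => simp [PySem.Chars.splitOn.go, splitSp, mapHead]
    | cons c rest =>
      rw [PySem.Chars.splitOn.go]
      by_cases hc : c = ' '
      · subst hc
        simp only [List.isPrefixOf, Bool.and_true, beq_self_eq_true, if_pos]
        rw [show List.drop [' '].length (' ' :: rest) = rest by simp,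
          ih rest [] (cur.reverse :: acc) (by simpa using h)]
        simp [splitSp, mapHead, mapHead_nil_append]
        cases splitSp rest <;> rfl
      · have hpre : [' '].isPrefixOf (c :: rest) = false := by
          simp [List.isPrefixOf]
          exact fun h' => absurd h'.symm hc
        rw [hpre]
        simp only [Bool.false_eq_true, if_false]
        rw [ih rest (c :: cur) acc (by simpa using h)]
        obtain ⟨h1, r, hr⟩ : ∃ h1 r, splitSp rest = h1 :: r := by
          cases hsp : splitSp rest with
          | nil => exact absurd hsp (splitSp_ne_nil rest)
          | cons a b => exact ⟨a, b, rfl⟩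
        simp [splitSp, hc, hr, mapHead]

theorem splitOn_eq (l : List Char) : PySem.Chars.splitOn l [' '] = splitSp l := by
  rw [PySem.Chars.splitOn, go_eq (l.length + 1) l [] [] (by omega)]
  simp [mapHead_nil_append, mapHead_id]

def countGood (ll : List (List Char)) : Int :=
  ((ll.filter (fun w => 5 < w.length)).length : Int)

theorem foldA_eq (l : List Char) : ∀ (p : List Char) (k : Int),
    (l.foldl stepAc (p, k)).2 = k + countGood (mapHead (p ++ ·) (splitSp l)).dropLast := by
  induction l with
  | nil => intro p k; simp [splitSp, mapHead, countGood]
  | cons c t ih =>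
    intro p k
    by_cases hc : c = ' '
    · subst hc
      rw [List.foldl_cons, show stepAc (p, k) ' ' = ([], if 5 < p.length then k + 1 else k) by
        simp [stepAc], ih]
      obtain ⟨h1, r, hr⟩ : ∃ h1 r, splitSp t = h1 :: r := by
        cases hsp : splitSp t with
        | nil => exact absurd hsp (splitSp_ne_nil t)
        | cons a b => exact ⟨a, b, rfl⟩
      simp only [splitSp, if_pos rfl, hr, mapHead, List.nil_append, List.dropLast_cons₂,
        countGood, List.filter_cons]
      by_cases hp : 5 < p.length
      · simp [hp]; ring
      · simp [hp]
    · rw [List.foldl_cons, show stepAc (p, k) c = (p ++ [c], k) by simp [stepAc, hc], ih]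
      obtain ⟨h1, r, hr⟩ : ∃ h1 r, splitSp t = h1 :: r := by
        cases hsp : splitSp t with
        | nil => exact absurd hsp (splitSp_ne_nil t)
        | cons a b => exact ⟨a, b, rfl⟩
      simp [splitSp, hc, hr, mapHead]

theorem ports_agree (cadena : String) :
    contar_palabras_for cadena = contar_palabras_for_alt cadena := by
  rw [contar_palabras_for, contar_palabras_for_alt]
  rw [show PySem.Str.len cadena = PySem.List.len cadena.toList by
    simp [PySem.Str.len, PySem.Chars.len, PySem.List.len]]
  rw [show (PySem.List.pyRange 0 (PySem.List.len cadena.toList)) =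
    (PySem.List.pyRange 0 (PySem.List.len cadena.toList) 1) from rfl]
  rw [PySem.List.foldl_pyRange_pyGetD cadena.toList ' ' stepAc ([], 0) (le_refl 0)]
  simp only [Int.toNat_zero, List.drop_zero]
  rw [splitOn_eq, PySem.List.slice_to_neg_one, foldA_eq]
  rw [mapHead_nil_append]
  simp [countGood]

-- ===== VERDICT (by name: the statement is the Claim_ definition above) =====
theorem contar_palabras_for_spec : Claim_equal_contar_palabras_for := by
  intro cadena _
  unfold Spec_contar_palabras_for
  exact ports_agree cadena
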